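-- pv_equiv track=rewrite | github.com/sistemasbuho/Sistema-Alertas | apps/base/api/listar_redes.py | obtener_contenido_twitter
-- ===== SOURCE A (Python) =====
-- def obtener_contenido_twitter(texto, red_social):
--     """
--     Devuelve el texto hasta QT/Repost (incluyendo la palabra).
--     """
--     if red_social.lower() == "twitter":
--         qt_index = texto.find("QT")
--         repost_index = texto.find("Repost")
--         indices = [i for i in [qt_index, repost_index] if i != -1]
--         if indices:
--             corte = min(indices)
--             # Agregamos la longitud de la palabra encontrada
--             if corte == qt_index:
--                 corte += len("QT")
--             elif corte == repost_index:
--                 corte += len("Repost")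
--             return texto[:corte].strip()
--         else:
--             return texto.strip()
--     return texto.strip()
-- ===== SOURCE B (Python) =====
-- def obtener_contenido_twitter(texto, red_social):
--     """
--     Devuelve el texto hasta QT/Repost (incluyendo la palabra).
--     """
--     if red_social.lower() == "twitter":
--         for i in range(len(texto)):
--             if texto.startswith("QT", i):
--                 return texto[:i + 2].strip()
--             if texto.startswith("Repost", i):
--                 return texto[:i + 6].strip()
--     return texto.strip()
-- ===== Notes on version B (the rewrite author's own statement) =====
-- stated objective: alternative
-- what changed: Replaces the two full find() scans plus min()/index-comparison adjustment by a single left-to-right scan that stops at the first marker and already knows which word matched, so no min and no corte==index bookkeeping is needed.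
import Mathlib
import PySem

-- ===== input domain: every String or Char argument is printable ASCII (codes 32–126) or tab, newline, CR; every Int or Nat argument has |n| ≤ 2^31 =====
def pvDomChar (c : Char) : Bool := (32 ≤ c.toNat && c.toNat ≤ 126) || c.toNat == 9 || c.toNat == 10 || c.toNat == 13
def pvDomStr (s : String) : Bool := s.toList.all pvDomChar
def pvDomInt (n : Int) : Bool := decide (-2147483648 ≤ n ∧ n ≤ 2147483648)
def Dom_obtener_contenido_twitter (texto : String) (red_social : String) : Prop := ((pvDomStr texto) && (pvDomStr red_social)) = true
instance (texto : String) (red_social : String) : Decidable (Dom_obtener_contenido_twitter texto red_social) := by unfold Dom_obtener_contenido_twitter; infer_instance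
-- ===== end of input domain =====

-- B replaces A's two full find() scans plus min()/index-comparison adjustment by a single
-- left-to-right scan that stops at the first marker (objective: alternative, same cost).

-- ===== PORT A =====
def obtener_contenido_twitter (texto : String) (red_social : String) : String :=
  if PySem.Str.lower red_social = "twitter" then
    let qt_index := PySem.Str.find texto "QT"
    let repost_index := PySem.Str.find texto "Repost"
    let indices := [qt_index, repost_index].filter (fun i => i != -1)
    match PySem.List.min? indices (fun x => x) with
    | some m =>
        let corte := if m = qt_index then m + 2 else if m = repost_index then m + 6 else m
        PySem.Str.strip (PySem.Str.slice texto none (some corte))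
    | none => PySem.Str.strip texto
  else PySem.Str.strip texto

-- ===== PORT B =====
-- the 'for i in range(len(texto)): if texto.startswith(w, i)' loop of Source B, as structural
-- recursion on the suffix; returns the cut length i + len(w) of the first marker, if any
def pvScanQR : List Char → Option Nat
  | [] => none
  | c :: rest =>
    if ['Q', 'T'].isPrefixOf (c :: rest) then some 2
    else if ['R', 'e', 'p', 'o', 's', 't'].isPrefixOf (c :: rest) then some 6
    else (pvScanQR rest).map (· + 1)

def obtener_contenido_twitter_alt (texto : String) (red_social : String) : String :=
  if PySem.Str.lower red_social = "twitter" then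
    match pvScanQR texto.toList with
    | some n => String.ofList (PySem.Chars.strip (texto.toList.take n))
    | none => PySem.Str.strip texto
  else PySem.Str.strip texto

-- ===== PRECONDITION & SPEC =====
def Spec_obtener_contenido_twitter (texto : String) (red_social : String) (out : String) : Prop := out = obtener_contenido_twitter_alt texto red_social
instance (texto : String) (red_social : String) (out : String) : Decidable (Spec_obtener_contenido_twitter texto red_social out) := by unfold Spec_obtener_contenido_twitter; infer_instance

-- ===== CLAIM (what is proved, stated in full; the proofs are below) =====
def Claim_equal_obtener_contenido_twitter : Prop := ∀ (texto : String) (red_social : String), Dom_obtener_contenido_twitter texto red_social → Spec_obtener_contenido_twitter texto red_social (obtener_contenido_twitter texto red_social)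

-- ===== LEMMAS AND PROOFS =====

lemma pvScanQR_none (cs : List Char)
    (hq : ∀ j, ¬ ['Q', 'T'] <+: cs.drop j)
    (hr : ∀ j, ¬ ['R', 'e', 'p', 'o', 's', 't'] <+: cs.drop j) :
    pvScanQR cs = none := by
  induction cs with
  | nil => rfl
  | cons c rest ih =>
    have h0q := hq 0
    have h0r := hr 0
    simp only [List.drop_zero] at h0q h0r
    rw [pvScanQR]
    rw [if_neg (by simpa [List.isPrefixOf_iff_prefix] using h0q),
        if_neg (by simpa [List.isPrefixOf_iff_prefix] using h0r)]
    rw [ih (fun j => hq (j + 1)) (fun j => hr (j + 1))]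
    rfl

lemma pvScanQR_qt (j : Nat) (cs : List Char)
    (hj : ['Q', 'T'] <+: cs.drop j)
    (hmin : ∀ i < j, ¬ ['Q', 'T'] <+: cs.drop i ∧ ¬ ['R', 'e', 'p', 'o', 's', 't'] <+: cs.drop i) :
    pvScanQR cs = some (j + 2) := by
  induction j generalizing cs with
  | zero =>
    simp only [List.drop_zero] at hj
    obtain ⟨t, rfl⟩ := hj
    rw [pvScanQR.eq_def]
    simp
  | succ j ih =>
    match cs with
    | [] => simp at hj
    | c :: rest =>
      have h0 := hmin 0 (by omega)
      simp only [List.drop_zero] at h0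
      rw [pvScanQR]
      rw [if_neg (by simpa [List.isPrefixOf_iff_prefix] using h0.1),
          if_neg (by simpa [List.isPrefixOf_iff_prefix] using h0.2)]
      rw [ih rest (by simpa using hj)
          (fun i hi => by simpa using hmin (i + 1) (by omega))]
      rfl

lemma pvScanQR_rp (j : Nat) (cs : List Char)
    (hj : ['R', 'e', 'p', 'o', 's', 't'] <+: cs.drop j)
    (hq : ¬ ['Q', 'T'] <+: cs.drop j)
    (hmin : ∀ i < j, ¬ ['Q', 'T'] <+: cs.drop i ∧ ¬ ['R', 'e', 'p', 'o', 's', 't'] <+: cs.drop i) :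
    pvScanQR cs = some (j + 6) := by
  induction j generalizing cs with
  | zero =>
    simp only [List.drop_zero] at hj hq
    obtain ⟨t, rfl⟩ := hj
    simp only [List.cons_append, pvScanQR, List.isPrefixOf_iff_prefix]
    rw [if_neg (by simp)]
    simp
  | succ j ih =>
    match cs with
    | [] => simp at hj
    | c :: rest =>
      have h0 := hmin 0 (by omega)
      simp only [List.drop_zero] at h0
      rw [pvScanQR]
      rw [if_neg (by simpa [List.isPrefixOf_iff_prefix] using h0.1),
          if_neg (by simpa [List.isPrefixOf_iff_prefix] using h0.2)]
      rw [ih rest (by simpa using hj) (by simpa using hq)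
          (fun i hi => by simpa using hmin (i + 1) (by omega))]
      rfl

-- no occurrence anywhere ↔ find = -1
lemma no_prefix_of_find_neg (cs sub : List Char) (h : PySem.Chars.find cs sub = -1) :
    ∀ j, ¬ sub <+: cs.drop j := by
  intro j hpre
  have : sub <:+: cs := by
    rw [← PySem.Chars.isIn_iff_infix, ← PySem.Chars.exists_prefix_drop_iff_isIn]
    exact ⟨j, hpre⟩
  exact ((PySem.Chars.find_eq_neg_one_iff cs sub).mp h) this

-- the two twitter branches agree: A's two finds + min + adjustment compute the same cut as B's scan
lemma pvCore (texto : String) :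
    (let qt_index := PySem.Str.find texto "QT"
     let repost_index := PySem.Str.find texto "Repost"
     let indices := [qt_index, repost_index].filter (fun i => i != -1)
     match PySem.List.min? indices (fun x => x) with
     | some m =>
         let corte := if m = qt_index then m + 2 else if m = repost_index then m + 6 else m
         PySem.Str.strip (PySem.Str.slice texto none (some corte))
     | none => PySem.Str.strip texto)
    = (match pvScanQR texto.toList with
       | some n => String.ofList (PySem.Chars.strip (texto.toList.take n))
       | none => PySem.Str.strip texto) := by
  have hQT : "QT".toList = ['Q', 'T'] := by simp
  have hRP : "Repost".toList = ['R', 'e', 'p', 'o', 's', 't'] := by simp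
  simp only [PySem.Str.find, hQT, hRP]
  set cl := texto.toList with hcl
  set q := PySem.Chars.find cl ['Q', 'T'] with hqdef
  set r := PySem.Chars.find cl ['R', 'e', 'p', 'o', 's', 't'] with hrdef
  have hq1 : -1 ≤ q := PySem.Chars.neg_one_le_find cl _
  have hr1 : -1 ≤ r := PySem.Chars.neg_one_le_find cl _
  have hqd : q = -1 ∨ 0 ≤ q := by omega
  have hrd : r = -1 ∨ 0 ≤ r := by omega
  rcases hqd with hqe | hq0
  · rcases hrd with hre | hr0
    · -- no marker at all
      have hscan : pvScanQR cl = none :=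
        pvScanQR_none cl (no_prefix_of_find_neg cl _ hqe) (no_prefix_of_find_neg cl _ hre)
      have hfilter : [q, r].filter (fun i => i != -1) = [] := by
        rw [hqe, hre]; rfl
      rw [hfilter, hscan]
      rfl
    · -- Repost only
      have hspec := PySem.Chars.find_spec hr0
      rw [← hrdef] at hspec
      have hnq := no_prefix_of_find_neg cl ['Q', 'T'] hqe
      have hscan : pvScanQR cl = some (r.toNat + 6) :=
        pvScanQR_rp r.toNat cl hspec.1 (hnq _) (fun i hi => ⟨hnq i, hspec.2 i hi⟩)
      have hfilter : [q, r].filter (fun i => i != -1) = [r] := by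
        rw [hqe]
        simp [show ¬ r = -1 by omega]
      rw [hfilter, hscan, PySem.List.min?_id_cons]
      simp only [List.foldl_nil]
      rw [if_neg (show ¬ r = q by omega)]
      simp only [if_true]
      simp only [PySem.Str.strip, PySem.Str.slice, PySem.Chars.slice_eq_listSlice, String.toList_ofList, ← hcl]
      rw [PySem.List.slice_to cl (show (0:Int) ≤ r + 6 by omega),
        show (r + 6).toNat = r.toNat + 6 from by omega]
  · rcases hrd with hre | hr0
    · -- QT only
      have hspec := PySem.Chars.find_spec hq0
      rw [← hqdef] at hspec
      have hnr := no_prefix_of_find_neg cl ['R', 'e', 'p', 'o', 's', 't'] hre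
      have hscan : pvScanQR cl = some (q.toNat + 2) :=
        pvScanQR_qt q.toNat cl hspec.1 (fun i hi => ⟨hspec.2 i hi, hnr i⟩)
      have hfilter : [q, r].filter (fun i => i != -1) = [q] := by
        rw [hre]
        simp [show ¬ q = -1 by omega]
      rw [hfilter, hscan, PySem.List.min?_id_cons]
      simp only [List.foldl_nil]
      simp only [if_true]
      simp only [PySem.Str.strip, PySem.Str.slice, PySem.Chars.slice_eq_listSlice, String.toList_ofList, ← hcl]
      rw [PySem.List.slice_to cl (show (0:Int) ≤ q + 2 by omega),
        show (q + 2).toNat = q.toNat + 2 from by omega]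
    · -- both markers occur
      have hqspec := PySem.Chars.find_spec hq0
      rw [← hqdef] at hqspec
      have hrspec := PySem.Chars.find_spec hr0
      rw [← hrdef] at hrspec
      have hfilter : [q, r].filter (fun i => i != -1) = [q, r] := by
        simp [show ¬ q = -1 by omega, show ¬ r = -1 by omega]
      rw [hfilter, PySem.List.min?_id_cons]
      simp only [List.foldl_cons, List.foldl_nil]
      rcases le_or_gt q r with hqr | hrq
      · have hscan : pvScanQR cl = some (q.toNat + 2) :=
          pvScanQR_qt q.toNat cl hqspec.1
            (fun i hi => ⟨hqspec.2 i hi, hrspec.2 i (by omega)⟩)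
        rw [hscan, min_eq_left hqr, if_pos rfl]
        simp only [PySem.Str.strip, PySem.Str.slice, PySem.Chars.slice_eq_listSlice, String.toList_ofList, ← hcl]
        rw [PySem.List.slice_to cl (show (0:Int) ≤ q + 2 by omega),
          show (q + 2).toNat = q.toNat + 2 from by omega]
      · have hscan : pvScanQR cl = some (r.toNat + 6) :=
          pvScanQR_rp r.toNat cl hrspec.1 (hqspec.2 r.toNat (by omega))
            (fun i hi => ⟨hqspec.2 i (by omega), hrspec.2 i hi⟩)
        rw [hscan, min_eq_right (le_of_lt hrq), if_neg (show ¬ r = q by omega), if_pos rfl]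
        simp only [PySem.Str.strip, PySem.Str.slice, PySem.Chars.slice_eq_listSlice, String.toList_ofList, ← hcl]
        rw [PySem.List.slice_to cl (show (0:Int) ≤ r + 6 by omega),
          show (r + 6).toNat = r.toNat + 6 from by omega]

-- ===== VERDICT (by name: the statement is the Claim_ definition above) =====
theorem obtener_contenido_twitter_spec : Claim_equal_obtener_contenido_twitter := by
  intro texto red_social _
  unfold Spec_obtener_contenido_twitter obtener_contenido_twitter obtener_contenido_twitter_alt
  by_cases hred : PySem.Str.lower red_social = "twitter"
  · rw [if_pos hred, if_pos hred]
    exact pvCore texto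
  · rw [if_neg hred, if_neg hred]
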